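-- pv_equiv track=rewrite | github.com/innate-inc/innate-os | ros2_ws/src/maurice_bot/maurice_arm/maurice_arm/test.py | update_crc
-- ===== SOURCE A (Python) =====
-- def update_crc(data_blk):
--     crc_table = [
--         0x0000, 0x8005, 0x800F, 0x000A, 0x801B, 0x001E, 0x0014, 0x8011,
--         0x8033, 0x0036, 0x003C, 0x8039, 0x0028, 0x802D, 0x8027, 0x0022,
--         0x8063, 0x0066, 0x006C, 0x8069, 0x0078, 0x807D, 0x8077, 0x0072,
--         0x0050, 0x8055, 0x805F, 0x005A, 0x804B, 0x004E, 0x0044, 0x8041,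
--         0x80C3, 0x00C6, 0x00CC, 0x80C9, 0x00D8, 0x80DD, 0x80D7, 0x00D2,
--         0x00F0, 0x80F5, 0x80FF, 0x00FA, 0x80EB, 0x00EE, 0x00E4, 0x80E1,
--         0x00A0, 0x80A5, 0x80AF, 0x00AA, 0x80BB, 0x00BE, 0x00B4, 0x80B1,
--         0x8093, 0x0096, 0x009C, 0x8099, 0x0088, 0x808D, 0x8087, 0x0082,
--         0x8183, 0x0186, 0x018C, 0x8189, 0x0198, 0x819D, 0x8197, 0x0192,
--         0x01B0, 0x81B5, 0x81BF, 0x01BA, 0x81AB, 0x01AE, 0x01A4, 0x81A1,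
--         0x01E0, 0x81E5, 0x81EF, 0x01EA, 0x81FB, 0x01FE, 0x01F4, 0x81F1,
--         0x81D3, 0x01D6, 0x01DC, 0x81D9, 0x01C8, 0x81CD, 0x81C7, 0x01C2,
--         0x0140, 0x8145, 0x814F, 0x014A, 0x815B, 0x015E, 0x0154, 0x8151,
--         0x8173, 0x0176, 0x017C, 0x8179, 0x0168, 0x816D, 0x8167, 0x0162,
--         0x8123, 0x0126, 0x012C, 0x8129, 0x0138, 0x813D, 0x8137, 0x0132,
--         0x0110, 0x8115, 0x811F, 0x011A, 0x810B, 0x010E, 0x0104, 0x8101,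
--         0x8303, 0x0306, 0x030C, 0x8309, 0x0318, 0x831D, 0x8317, 0x0312,
--         0x0330, 0x8335, 0x833F, 0x033A, 0x832B, 0x032E, 0x0324, 0x8321,
--         0x0360, 0x8365, 0x836F, 0x036A, 0x837B, 0x037E, 0x0374, 0x8371,
--         0x8353, 0x0356, 0x035C, 0x8359, 0x0348, 0x834D, 0x8347, 0x0342,
--         0x03C0, 0x83C5, 0x83CF, 0x03CA, 0x83DB, 0x03DE, 0x03D4, 0x83D1,
--         0x83F3, 0x03F6, 0x03FC, 0x83F9, 0x03E8, 0x83ED, 0x83E7, 0x03E2,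
--         0x83A3, 0x03A6, 0x03AC, 0x83A9, 0x03B8, 0x83BD, 0x83B7, 0x03B2,
--         0x0390, 0x8395, 0x839F, 0x039A, 0x838B, 0x038E, 0x0384, 0x8381,
--         0x0280, 0x8285, 0x828F, 0x028A, 0x829B, 0x029E, 0x0294, 0x8291,
--         0x82B3, 0x02B6, 0x02BC, 0x82B9, 0x02A8, 0x82AD, 0x82A7, 0x02A2,
--         0x82E3, 0x02E6, 0x02EC, 0x82E9, 0x02F8, 0x82FD, 0x82F7, 0x02F2,
--         0x02D0, 0x82D5, 0x82DF, 0x02DA, 0x82CB, 0x02CE, 0x02C4, 0x82C1,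
--         0x8243, 0x0246, 0x024C, 0x8249, 0x0258, 0x825D, 0x8257, 0x0252,
--         0x0270, 0x8275, 0x827F, 0x027A, 0x826B, 0x026E, 0x0264, 0x8261,
--         0x0220, 0x8225, 0x822F, 0x022A, 0x823B, 0x023E, 0x0234, 0x8231,
--         0x8213, 0x0216, 0x021C, 0x8219, 0x0208, 0x820D, 0x8207, 0x0202
--     ]
--     crc_accum = 0
--     for b in data_blk:
--         i = ((crc_accum >> 8) ^ b) & 0xFF
--         crc_accum = ((crc_accum << 8) ^ crc_table[i]) & 0xFFFF
--     return crc_accum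
-- ===== SOURCE B (Python) =====
-- def update_crc(data_blk):
--     # Bit-by-bit CRC-16 (poly 0x8005, MSB-first): no lookup table.
--     crc = 0
--     for b in data_blk:
--         crc ^= (b & 0xFF) << 8
--         for _ in range(8):
--             if crc & 0x8000:
--                 crc = ((crc << 1) ^ 0x8005) & 0xFFFF
--             else:
--                 crc = (crc << 1) & 0xFFFF
--     return crc
-- ===== Notes on version B (the rewrite author's own statement) =====
-- stated objective: simpler
-- what changed: Replaces A's 256-entry precomputed lookup table with the bit-by-bit MSB-first CRC-16 (polynomial 0x8005): per byte, xor the byte into the high half and run eight shift/conditional-xor steps, eliminating the table entirely.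
import Mathlib
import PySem

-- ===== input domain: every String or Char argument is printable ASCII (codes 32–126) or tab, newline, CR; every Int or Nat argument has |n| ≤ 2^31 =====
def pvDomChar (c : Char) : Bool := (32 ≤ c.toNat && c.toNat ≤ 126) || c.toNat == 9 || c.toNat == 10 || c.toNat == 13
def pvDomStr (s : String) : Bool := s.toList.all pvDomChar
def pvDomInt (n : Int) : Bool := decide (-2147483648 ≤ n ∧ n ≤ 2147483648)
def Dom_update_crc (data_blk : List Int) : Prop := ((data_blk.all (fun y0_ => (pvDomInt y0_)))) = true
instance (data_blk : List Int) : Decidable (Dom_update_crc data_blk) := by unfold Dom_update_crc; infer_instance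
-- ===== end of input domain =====

-- B replaces A's 256-entry lookup table by the equivalent bit-by-bit MSB-first CRC-16 (poly 0x8005): simpler, no table (same O(n) cost).

-- ===== PORT A =====
def crcTable : List Int := [
  0x0000, 0x8005, 0x800F, 0x000A, 0x801B, 0x001E, 0x0014, 0x8011,
  0x8033, 0x0036, 0x003C, 0x8039, 0x0028, 0x802D, 0x8027, 0x0022,
  0x8063, 0x0066, 0x006C, 0x8069, 0x0078, 0x807D, 0x8077, 0x0072,
  0x0050, 0x8055, 0x805F, 0x005A, 0x804B, 0x004E, 0x0044, 0x8041,
  0x80C3, 0x00C6, 0x00CC, 0x80C9, 0x00D8, 0x80DD, 0x80D7, 0x00D2,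
  0x00F0, 0x80F5, 0x80FF, 0x00FA, 0x80EB, 0x00EE, 0x00E4, 0x80E1,
  0x00A0, 0x80A5, 0x80AF, 0x00AA, 0x80BB, 0x00BE, 0x00B4, 0x80B1,
  0x8093, 0x0096, 0x009C, 0x8099, 0x0088, 0x808D, 0x8087, 0x0082,
  0x8183, 0x0186, 0x018C, 0x8189, 0x0198, 0x819D, 0x8197, 0x0192,
  0x01B0, 0x81B5, 0x81BF, 0x01BA, 0x81AB, 0x01AE, 0x01A4, 0x81A1,
  0x01E0, 0x81E5, 0x81EF, 0x01EA, 0x81FB, 0x01FE, 0x01F4, 0x81F1,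
  0x81D3, 0x01D6, 0x01DC, 0x81D9, 0x01C8, 0x81CD, 0x81C7, 0x01C2,
  0x0140, 0x8145, 0x814F, 0x014A, 0x815B, 0x015E, 0x0154, 0x8151,
  0x8173, 0x0176, 0x017C, 0x8179, 0x0168, 0x816D, 0x8167, 0x0162,
  0x8123, 0x0126, 0x012C, 0x8129, 0x0138, 0x813D, 0x8137, 0x0132,
  0x0110, 0x8115, 0x811F, 0x011A, 0x810B, 0x010E, 0x0104, 0x8101,
  0x8303, 0x0306, 0x030C, 0x8309, 0x0318, 0x831D, 0x8317, 0x0312,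
  0x0330, 0x8335, 0x833F, 0x033A, 0x832B, 0x032E, 0x0324, 0x8321,
  0x0360, 0x8365, 0x836F, 0x036A, 0x837B, 0x037E, 0x0374, 0x8371,
  0x8353, 0x0356, 0x035C, 0x8359, 0x0348, 0x834D, 0x8347, 0x0342,
  0x03C0, 0x83C5, 0x83CF, 0x03CA, 0x83DB, 0x03DE, 0x03D4, 0x83D1,
  0x83F3, 0x03F6, 0x03FC, 0x83F9, 0x03E8, 0x83ED, 0x83E7, 0x03E2,
  0x83A3, 0x03A6, 0x03AC, 0x83A9, 0x03B8, 0x83BD, 0x83B7, 0x03B2,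
  0x0390, 0x8395, 0x839F, 0x039A, 0x838B, 0x038E, 0x0384, 0x8381,
  0x0280, 0x8285, 0x828F, 0x028A, 0x829B, 0x029E, 0x0294, 0x8291,
  0x82B3, 0x02B6, 0x02BC, 0x82B9, 0x02A8, 0x82AD, 0x82A7, 0x02A2,
  0x82E3, 0x02E6, 0x02EC, 0x82E9, 0x02F8, 0x82FD, 0x82F7, 0x02F2,
  0x02D0, 0x82D5, 0x82DF, 0x02DA, 0x82CB, 0x02CE, 0x02C4, 0x82C1,
  0x8243, 0x0246, 0x024C, 0x8249, 0x0258, 0x825D, 0x8257, 0x0252,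
  0x0270, 0x8275, 0x827F, 0x027A, 0x826B, 0x026E, 0x0264, 0x8261,
  0x0220, 0x8225, 0x822F, 0x022A, 0x823B, 0x023E, 0x0234, 0x8231,
  0x8213, 0x0216, 0x021C, 0x8219, 0x0208, 0x820D, 0x8207, 0x0202
]

def update_crc (data_blk : List Int) : Int :=
  data_blk.foldl (fun crc_accum b =>
    let i := PySem.Int.band (PySem.Int.bxor (crc_accum >>> (8:Nat)) b) 0xFF
    -- i is always in [0,256), so pyGet? never returns none here; getD 0 only totalises the port
    PySem.Int.band (PySem.Int.bxor (crc_accum <<< (8:Nat)) ((PySem.List.pyGet? crcTable i).getD 0)) 0xFFFF) 0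

-- ===== PORT B =====
def pvBitstep (c : Int) : Int :=
  if PySem.Int.band c 0x8000 ≠ 0 then PySem.Int.band (PySem.Int.bxor (c <<< (1:Nat)) 0x8005) 0xFFFF
  else PySem.Int.band (c <<< (1:Nat)) 0xFFFF

def update_crc_alt (data_blk : List Int) : Int :=
  data_blk.foldl (fun crc b =>
    (List.range 8).foldl (fun c _ => pvBitstep c)
      (PySem.Int.bxor crc (PySem.Int.band b 0xFF <<< (8:Nat)))) 0

-- ===== PRECONDITION & SPEC =====
def Spec_update_crc (data_blk : List Int) (out : Int) : Prop := out = update_crc_alt data_blk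
instance (data_blk : List Int) (out : Int) : Decidable (Spec_update_crc data_blk out) := by unfold Spec_update_crc; infer_instance

-- ===== CLAIM (what is proved, stated in full; the proofs are below) =====
def Claim_equal_update_crc : Prop := ∀ (data_blk : List Int), Dom_update_crc data_blk → Spec_update_crc data_blk (update_crc data_blk)

-- ===== LEMMAS AND PROOFS =====

-- A's per-byte step / B's per-byte step, named for the proofs
def pvStepA (crc b : Int) : Int :=
  PySem.Int.band (PySem.Int.bxor (crc <<< (8:Nat))
    ((PySem.List.pyGet? crcTable (PySem.Int.band (PySem.Int.bxor (crc >>> (8:Nat)) b) 0xFF)).getD 0)) 0xFFFF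

def pvStepB (crc b : Int) : Int :=
  (List.range 8).foldl (fun c _ => pvBitstep c) (PySem.Int.bxor crc (PySem.Int.band b 0xFF <<< (8:Nat)))

-- masking with a nonnegative mask always lands in [0, m]
lemma pvBand_mask_range (a : Int) (m : Nat) : 0 ≤ PySem.Int.band a ↑m ∧ PySem.Int.band a ↑m ≤ ↑m := by
  have hb : (0:Int) ≤ ↑m := by positivity
  unfold PySem.Int.band
  split_ifs with h1
  · simp only [Int.toNat_natCast]
    exact ⟨Int.natCast_nonneg _, by exact_mod_cast Nat.and_le_right⟩
  · simp only [Int.toNat_natCast]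
    exact ⟨Int.natCast_nonneg _, by exact_mod_cast Nat.sub_le _ _⟩

-- finite complement fact used for negative b
set_option maxRecDepth 4000 in
lemma pvSub_eq_xor : ∀ y : Fin 256, 255 - (y : Nat) = 255 ^^^ (y : Nat) := by decide

lemma pvSub_eq_xor' (y : Nat) (hy : y < 256) : 255 - y = 255 ^^^ y := pvSub_eq_xor ⟨y, hy⟩

lemma pvAnd255 (x : Nat) : x &&& 255 = x % 256 := by
  have := Nat.and_two_pow_sub_one_eq_mod x 8
  norm_num at this
  exact this

lemma pvAnd65535 (x : Nat) : x &&& 65535 = x % 65536 := by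
  have := Nat.and_two_pow_sub_one_eq_mod x 16
  norm_num at this
  exact this

-- masking a xor by 0xFF commutes with reducing the right argument, for small left argument
lemma pvBand_bxor_byte (h : Nat) (hh : h < 256) (b : Int) :
    PySem.Int.band (PySem.Int.bxor (↑h) b) 255 = PySem.Int.bxor (↑h) (PySem.Int.band b 255) := by
  have h255 : (255:Int) = ((255:Nat):Int) := by norm_num
  have hmask : ∀ x : Nat, x < 256 → x &&& 255 = x := fun x hx => by
    rw [pvAnd255]; exact Nat.mod_eq_of_lt hx
  by_cases hb : 0 ≤ b
  · -- b ≥ 0: everything is a Nat computation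
    rw [PySem.Int.bxor_of_nonneg (Int.natCast_nonneg h) hb, h255, PySem.Int.band_natCast,
      PySem.Int.band_of_nonneg hb (by norm_num), PySem.Int.bxor_natCast]
    congr 1
    simp only [Int.toNat_natCast]
    rw [Nat.and_xor_distrib_right, hmask h hh]
  · -- b < 0: unfold into the two's-complement branches
    have hb' : b < 0 := by omega
    set m : Nat := (-b - 1).toNat with hm
    have hxor : PySem.Int.bxor (↑h) b = -(↑(h ^^^ m)) - 1 := by
      simp [PySem.Int.bxor, hb, hm]
    have hneg : PySem.Int.bxor (↑h) b < 0 := by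
      rw [hxor]; have : (0:Int) ≤ ↑(h ^^^ m) := Int.natCast_nonneg _; omega
    have hL : PySem.Int.band (PySem.Int.bxor (↑h) b) 255 = ↑(255 - ((h ^^^ m) &&& 255)) := by
      rw [hxor]
      have hnn : (0:Int) ≤ ↑(h ^^^ m) := Int.natCast_nonneg _
      rw [PySem.Int.band, if_neg (by omega), if_pos (by norm_num)]
      norm_num [Nat.and_comm]
      simp only [show ((255:Int)).toNat = 255 from rfl]
    have hR : PySem.Int.band b 255 = ↑(255 - (m &&& 255)) := by
      rw [PySem.Int.band, if_neg hb, if_pos (by norm_num)]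
      have hm2 : m = (-b).toNat - 1 := by omega
      norm_num [Nat.and_comm]
      simp only [show ((255:Int)).toNat = 255 from rfl, ← hm2]
      rw [Nat.and_comm]
    rw [hL, hR, PySem.Int.bxor_natCast]
    congr 1
    -- both sides are byte-sized complements; close with pvSub_eq_xor and xor algebra
    have h1 : (h ^^^ m) &&& 255 = h ^^^ (m &&& 255) := by
      rw [Nat.and_xor_distrib_right, hmask h hh]
    have h2 : m &&& 255 < 256 := by rw [pvAnd255]; omega
    have h3 : h ^^^ (m &&& 255) < 256 := Nat.xor_lt_two_pow (n := 8) hh h2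
    rw [h1, pvSub_eq_xor' _ h3, pvSub_eq_xor' _ h2]
    ac_rfl

-- Nat decomposition: injecting a byte into the high half
lemma pvInject (l h β : Nat) (hl : l < 256) :
    (2 ^ 8 * h + l) ^^^ (β <<< 8) = l ^^^ ((h ^^^ β) <<< 8) := by
  apply Nat.eq_of_testBit_eq
  intro i
  have hdec := Nat.testBit_two_pow_mul_add h (b := l) (i := 8) (by norm_num [hl]) i
  simp only [Nat.testBit_xor, hdec, Nat.testBit_shiftLeft]
  by_cases hi : i < 8
  · have h8 : decide (8 ≤ i) = false := decide_eq_false_iff_not.mpr (by omega)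
    simp [hi, h8]
  · have hfl : l.testBit i = false := Nat.testBit_lt_two_pow (by calc l < 256 := hl
      _ = 2 ^ 8 := by norm_num
      _ ≤ 2 ^ i := Nat.pow_le_pow_right (by norm_num) (by omega))
    simp [hi, (by omega : i ≥ 8), hfl]

-- Nat mirror of pvBitstep, for the finite/linearity arguments
def pvNatStep (n : Nat) : Nat :=
  if n &&& 32768 ≠ 0 then ((n <<< 1) ^^^ 32773) &&& 65535 else (n <<< 1) &&& 65535

def pvNatSteps8 (n : Nat) : Nat := (List.range 8).foldl (fun c _ => pvNatStep c) n

lemma pvBitstep_cast (n : Nat) : pvBitstep ↑n = ↑(pvNatStep n) := by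
  have h32768 : (32768:Int) = ((32768:Nat):Int) := by norm_num
  have h32773 : (32773:Int) = ((32773:Nat):Int) := by norm_num
  have h65535 : (65535:Int) = ((65535:Nat):Int) := by norm_num
  unfold pvBitstep pvNatStep
  simp only [h32768, PySem.Int.band_natCast]
  have hsh : ((n:Int)) <<< (1:Nat) = ((n <<< 1 : Nat) : Int) := (Int.natCast_shiftLeft _ _).symm
  by_cases h : n &&& 32768 = 0
  · simp only [h, Nat.cast_zero, ne_eq, not_true_eq_false, if_false]
    rw [hsh, h65535, PySem.Int.band_natCast]
  · rw [if_pos (by exact_mod_cast h), if_pos h, hsh, h32773, PySem.Int.bxor_natCast, h65535,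
      PySem.Int.band_natCast]

lemma pvSteps8_cast (n : Nat) :
    (List.range 8).foldl (fun c _ => pvBitstep c) (↑n : Int) = ↑(pvNatSteps8 n) := by
  have hr : List.range 8 = [0,1,2,3,4,5,6,7] := rfl
  simp [pvNatSteps8, hr, List.foldl, pvBitstep_cast]

lemma pvNatStep_linear (x y : Nat) : pvNatStep (x ^^^ y) = pvNatStep x ^^^ pvNatStep y := by
  have hx := Nat.and_two_pow x 15
  have hy := Nat.and_two_pow y 15
  have hxy : (x ^^^ y) &&& 32768 = (x &&& 32768) ^^^ (y &&& 32768) := Nat.and_xor_distrib_right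
  norm_num at hx hy
  unfold pvNatStep
  rw [hxy, hx, hy]
  cases x.testBit 15 <;> cases y.testBit 15 <;>
    simp [Nat.shiftLeft_xor_distrib, ← Nat.and_xor_distrib_right, Nat.xor_assoc,
      Nat.xor_comm, Nat.xor_left_comm]

lemma pvNatSteps8_linear (x y : Nat) :
    pvNatSteps8 (x ^^^ y) = pvNatSteps8 x ^^^ pvNatSteps8 y := by
  have hr : List.range 8 = [0,1,2,3,4,5,6,7] := rfl
  simp [pvNatSteps8, hr, List.foldl, pvNatStep_linear]

-- low byte alone: eight shifts, the top bit is never reached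
set_option maxRecDepth 4000 in
lemma pvLow : ∀ l : Fin 256, pvNatSteps8 (l : Nat) = (l : Nat) <<< 8 := by decide

-- a byte in the high half: eight bit-steps compute exactly A's table entry
set_option maxRecDepth 100000 in
lemma pvHigh : ∀ j : Fin 256,
    pvNatSteps8 ((j : Nat) <<< 8) = ((PySem.List.pyGet? crcTable ↑(j : Nat)).getD 0).toNat := by
  decide

-- the finite core: 8 bit-steps on l ^ (j << 8) equal the table step
lemma pvKey (l j : Fin 256) :
    (List.range 8).foldl (fun c _ => pvBitstep c) (↑((l : Nat) ^^^ ((j : Nat) <<< 8)) : Int)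
      = ↑(((l : Nat) <<< 8) ^^^ ((PySem.List.pyGet? crcTable ↑(j : Nat)).getD 0).toNat) := by
  rw [pvSteps8_cast, pvNatSteps8_linear, pvLow, pvHigh]

set_option maxRecDepth 10000 in
lemma pvTbl_range : ∀ j : Fin 256,
    0 ≤ (PySem.List.pyGet? crcTable ↑(j : Nat)).getD 0 ∧
    (PySem.List.pyGet? crcTable ↑(j : Nat)).getD 0 < 65536 := by decide

-- the per-byte steps agree on in-range states
set_option maxRecDepth 10000 in
lemma pvStep_eq (n : Nat) (hn : n < 65536) (b : Int) : pvStepA ↑n b = pvStepB ↑n b := by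
  have h65535 : (65535:Int) = ((65535:Nat):Int) := by norm_num
  set l := n % 256 with hl'
  set h := n / 256 with hh'
  have hl : l < 256 := Nat.mod_lt _ (by norm_num)
  have hh : h < 256 := by omega
  -- reduce b to its low byte β
  obtain ⟨hb0, hb1⟩ := pvBand_mask_range b 255
  norm_num at hb0 hb1
  set β := (PySem.Int.band b 255).toNat with hβ'
  have hβ : PySem.Int.band b 255 = ↑β := (Int.toNat_of_nonneg hb0).symm
  have hβlt : β < 256 := by omega
  -- the table index is h ^^^ β
  have hshr : ((n:Int)) >>> (8:Nat) = ((n >>> 8 : Nat) : Int) := (Int.natCast_shiftRight _ _).symm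
  have hdiv : n >>> 8 = h := by rw [Nat.shiftRight_eq_div_pow]
  have hidx : PySem.Int.band (PySem.Int.bxor ((n:Int) >>> (8:Nat)) b) 255 = ↑(h ^^^ β) := by
    rw [hshr, hdiv, pvBand_bxor_byte h hh b, hβ, PySem.Int.bxor_natCast]
  set J := h ^^^ β with hJ'
  have e28 : (2:Nat) ^ 8 = 256 := by norm_num
  have hJ : J < 256 := by
    rw [← e28]; exact Nat.xor_lt_two_pow (by rw [e28]; exact hh) (by rw [e28]; exact hβlt)
  obtain ⟨ht0, ht1⟩ := pvTbl_range ⟨J, hJ⟩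
  have ht0' : 0 ≤ (PySem.List.pyGet? crcTable ((J:Nat) : Int)).getD 0 := ht0
  have ht1' : (PySem.List.pyGet? crcTable ((J:Nat) : Int)).getD 0 < 65536 := ht1
  have htt : ((PySem.List.pyGet? crcTable (↑J)).getD 0)
      = ↑((PySem.List.pyGet? crcTable (↑J)).getD 0).toNat := (Int.toNat_of_nonneg ht0').symm
  set t : Nat := ((PySem.List.pyGet? crcTable (↑J)).getD 0).toNat with ht'
  have htlt : t < 65536 := by omega
  -- A's side becomes a pure Nat expression
  have hshl : ((n:Int)) <<< (8:Nat) = ((n <<< 8 : Nat) : Int) := (Int.natCast_shiftLeft _ _).symm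
  have hA : pvStepA ↑n b = ↑((l <<< 8) ^^^ t) := by
    unfold pvStepA
    rw [hidx, hshl, htt, PySem.Int.bxor_natCast, h65535, PySem.Int.band_natCast]
    congr 1
    rw [Nat.and_xor_distrib_right, pvAnd65535, pvAnd65535, Nat.mod_eq_of_lt htlt,
      Nat.shiftLeft_eq, Nat.shiftLeft_eq, e28]
    congr 1
    omega
  -- B's side: inject the byte, then the finite core
  have hB : pvStepB ↑n b = ↑((l <<< 8) ^^^ t) := by
    unfold pvStepB
    rw [hβ, show ((β:Int)) <<< (8:Nat) = ((β <<< 8 : Nat) : Int) from (Int.natCast_shiftLeft _ _).symm,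
      PySem.Int.bxor_natCast, show n = 2 ^ 8 * h + l from by omega, pvInject l h β hl]
    exact pvKey ⟨l, hl⟩ ⟨J, hJ⟩
  rw [hA, hB]

lemma pvStepA_range (crc b : Int) : 0 ≤ pvStepA crc b ∧ pvStepA crc b < 65536 := by
  have := pvBand_mask_range (PySem.Int.bxor (crc <<< (8:Nat))
    ((PySem.List.pyGet? crcTable (PySem.Int.band (PySem.Int.bxor (crc >>> (8:Nat)) b) 0xFF)).getD 0)) 65535
  unfold pvStepA
  push_cast at this
  constructor
  · exact this.1
  · omega

lemma pvFold_eq (data : List Int) : ∀ (n : Nat), n < 65536 →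
    data.foldl pvStepA ↑n = data.foldl pvStepB ↑n := by
  induction data with
  | nil => intro n _; rfl
  | cons a tl ih =>
    intro n hn
    simp only [List.foldl_cons]
    obtain ⟨h0, h1⟩ := pvStepA_range (↑n) a
    rw [← pvStep_eq n hn a, ← Int.toNat_of_nonneg h0]
    exact ih _ (by omega)

-- ===== VERDICT (by name: the statement is the Claim_ definition above) =====
theorem update_crc_spec : Claim_equal_update_crc := by
  intro data _
  unfold Spec_update_crc
  have hA : update_crc data = data.foldl pvStepA 0 := rfl
  have hB : update_crc_alt data = data.foldl pvStepB 0 := rfl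
  rw [hA, hB]
  exact_mod_cast pvFold_eq data 0 (by omega)
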